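-- pv_equiv track=rewrite | github.com/bbun-550/battlefield-awareness-ai | project/detector_gui/detect_1129.py | analyze_battlefield
-- ===== SOURCE A (Python) =====
-- def analyze_battlefield(counts):
--     red = sum(v for k,v in counts.items() if 'red' in k.lower())
--     tank = sum(v for k,v in counts.items() if 'tank' in k.lower())
--     blue = sum(v for k,v in counts.items() if 'blue' in k.lower())
--     if tank > 0: return f"WARNING: {tank} TANKS!"
--     elif red > 0: return f"Enemy: {red}"
--     elif blue > 0: return f"Friendly: {blue}"
--     return "Scouting..." if counts else "Searching..."
-- ===== SOURCE B (Python) =====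
-- KEYWORDS = ('tank', 'red', 'blue')
-- TEMPLATES = (('WARNING: ', ' TANKS!'), ('Enemy: ', ''), ('Friendly: ', ''))
--
-- def analyze_battlefield(counts):
--     totals = [0] * len(KEYWORDS)
--     for k, v in counts.items():
--         kl = k.lower()
--         for i, kw in enumerate(KEYWORDS):
--             if kw in kl:
--                 totals[i] += v
--     for total, (pre, suf) in zip(totals, TEMPLATES):
--         if total > 0:
--             return pre + str(total) + suf
--     return "Scouting..." if counts else "Searching..."
-- ===== Notes on version B (the rewrite author's own statement) =====
-- stated objective: alternative
-- what changed: Replaces A's three hard-coded comprehension scans and if/elif cascade by a table-driven design: a keyword table, a list of running totals filled in one pass with a nested loop over enumerate(KEYWORDS), and a priority loop over zip(totals, templates) that early-returns the first positive total.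
import Mathlib
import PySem

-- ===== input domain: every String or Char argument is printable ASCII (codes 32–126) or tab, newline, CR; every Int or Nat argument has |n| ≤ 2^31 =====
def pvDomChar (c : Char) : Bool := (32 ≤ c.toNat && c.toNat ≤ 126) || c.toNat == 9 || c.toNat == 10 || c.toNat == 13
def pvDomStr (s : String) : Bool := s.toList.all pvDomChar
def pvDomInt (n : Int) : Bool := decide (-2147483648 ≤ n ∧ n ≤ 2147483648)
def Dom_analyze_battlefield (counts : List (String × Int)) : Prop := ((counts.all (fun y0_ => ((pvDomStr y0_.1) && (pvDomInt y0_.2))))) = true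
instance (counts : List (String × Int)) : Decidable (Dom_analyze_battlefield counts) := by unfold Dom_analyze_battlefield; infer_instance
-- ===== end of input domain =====

-- B: a table-driven rewrite — a keyword table, a list of running totals filled in one pass,
-- and a priority loop over zip(totals, templates) with early return, replacing A's three
-- hard-coded scans and if/elif cascade (alternative decomposition; return value identical).

-- ===== PORT A =====
def analyze_battlefield (counts : List (String × Int)) : String :=
  let red : Int := ((counts.filter (fun p => PySem.Str.isIn "red" (PySem.Str.lower p.1))).map Prod.snd).sum
  let tank : Int := ((counts.filter (fun p => PySem.Str.isIn "tank" (PySem.Str.lower p.1))).map Prod.snd).sum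
  let blue : Int := ((counts.filter (fun p => PySem.Str.isIn "blue" (PySem.Str.lower p.1))).map Prod.snd).sum
  if tank > 0 then "WARNING: " ++ PySem.Int.toStr tank ++ " TANKS!"
  else if red > 0 then "Enemy: " ++ PySem.Int.toStr red
  else if blue > 0 then "Friendly: " ++ PySem.Int.toStr blue
  else if counts ≠ [] then "Scouting..." else "Searching..."

-- ===== PORT B =====
def pvKeywords : List String := ["tank", "red", "blue"]
def pvTemplates : List (String × String) := [("WARNING: ", " TANKS!"), ("Enemy: ", ""), ("Friendly: ", "")]

def analyze_battlefield_alt (counts : List (String × Int)) : String :=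
  let totals : List Int := counts.foldl (fun totals p =>
      let kl := PySem.Str.lower p.1
      (PySem.List.enumerate pvKeywords).foldl (fun t ikw =>
        if PySem.Str.isIn ikw.2 kl then t.set ikw.1.toNat (t[ikw.1.toNat]! + p.2) else t) totals)
    (List.replicate pvKeywords.length (0 : Int))
  match (totals.zip pvTemplates).find? (fun q => q.1 > 0) with
  | some q => q.2.1 ++ PySem.Int.toStr q.1 ++ q.2.2
  | none => if counts ≠ [] then "Scouting..." else "Searching..."

-- ===== PRECONDITION & SPEC =====
def Spec_analyze_battlefield (counts : List (String × Int)) (out : String) : Prop := out = analyze_battlefield_alt counts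
instance (counts : List (String × Int)) (out : String) : Decidable (Spec_analyze_battlefield counts out) := by unfold Spec_analyze_battlefield; infer_instance

-- ===== CLAIM (what is proved, stated in full; the proofs are below) =====
def Claim_equal_analyze_battlefield : Prop := ∀ (counts : List (String × Int)), Dom_analyze_battlefield counts → Spec_analyze_battlefield counts (analyze_battlefield counts)

-- ===== LEMMAS AND PROOFS =====

-- One item's pass over the keyword table updates each of the three totals iff its keyword matches.
theorem pv_inner (kl : String) (v a b c : Int) :
    (PySem.List.enumerate pvKeywords).foldl
      (fun t ikw => if PySem.Str.isIn ikw.2 kl = true then t.set ikw.1.toNat (t[ikw.1.toNat]! + v) else t)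
      [a, b, c] =
    [if PySem.Str.isIn "tank" kl then a + v else a,
     if PySem.Str.isIn "red" kl then b + v else b,
     if PySem.Str.isIn "blue" kl then c + v else c] := by
  simp only [pvKeywords, PySem.List.enumerate_cons, PySem.List.enumerate_nil, List.foldl]
  by_cases h1 : PySem.Str.isIn "tank" kl <;>
  by_cases h2 : PySem.Str.isIn "red" kl <;>
  by_cases h3 : PySem.Str.isIn "blue" kl <;>
    simp only [h1, h2, h3, if_true, if_false, Bool.false_eq_true] <;>
    simp

-- The one-pass fold over the keyword table computes exactly A's three filter-sums.
theorem pv_fold_totals (counts : List (String × Int)) (a b c : Int) :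
    counts.foldl (fun totals p =>
      (PySem.List.enumerate pvKeywords).foldl (fun t ikw =>
        if PySem.Str.isIn ikw.2 (PySem.Str.lower p.1) = true then t.set ikw.1.toNat (t[ikw.1.toNat]! + p.2) else t) totals)
      [a, b, c] =
    [a + ((counts.filter (fun p => PySem.Str.isIn "tank" (PySem.Str.lower p.1))).map Prod.snd).sum,
     b + ((counts.filter (fun p => PySem.Str.isIn "red" (PySem.Str.lower p.1))).map Prod.snd).sum,
     c + ((counts.filter (fun p => PySem.Str.isIn "blue" (PySem.Str.lower p.1))).map Prod.snd).sum] := by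
  induction counts generalizing a b c with
  | nil => simp
  | cons p cs ih =>
    rw [List.foldl_cons, pv_inner, ih]
    simp only [List.filter_cons]
    by_cases h1 : PySem.Str.isIn "tank" (PySem.Str.lower p.1) <;>
    by_cases h2 : PySem.Str.isIn "red" (PySem.Str.lower p.1) <;>
    by_cases h3 : PySem.Str.isIn "blue" (PySem.Str.lower p.1) <;>
      simp only [h1, h2, h3, if_true, Bool.false_eq_true, if_false, List.map_cons,
        List.sum_cons, List.cons.injEq, and_true] <;>
      simp [add_assoc]

-- ===== VERDICT (by name: the statement is the Claim_ definition above) =====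
theorem analyze_battlefield_spec : Claim_equal_analyze_battlefield := by
  intro counts _
  unfold Spec_analyze_battlefield analyze_battlefield analyze_battlefield_alt
  have hrep : List.replicate pvKeywords.length (0 : Int) = [0, 0, 0] := rfl
  rw [hrep, pv_fold_totals]
  simp only [zero_add, pvTemplates, List.zip, List.zipWith, List.find?]
  by_cases h1 : ((counts.filter (fun p => PySem.Str.isIn "tank" (PySem.Str.lower p.1))).map Prod.snd).sum > 0 <;>
  by_cases h2 : ((counts.filter (fun p => PySem.Str.isIn "red" (PySem.Str.lower p.1))).map Prod.snd).sum > 0 <;>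
  by_cases h3 : ((counts.filter (fun p => PySem.Str.isIn "blue" (PySem.Str.lower p.1))).map Prod.snd).sum > 0 <;>
    simp only [h1, h2, h3, decide_true, decide_false, if_pos, if_neg, not_false_iff] <;>
    simp
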